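-- pv_equiv track=rewrite | github.com/mirzadm/leetcode | src/p0910_smallest_range_2.py | smallest_range_2
-- ===== SOURCE A (Python) =====
-- from typing import List, Tuple, Set, Optional, NamedTuple
--
-- class NumShiftedNumPair(NamedTuple):
--     num: int
--     shifted_num: int
--
-- def smallest_range_2(nums: List[int], k: int) -> int:
--     initial_min, initial_max = min(nums), max(nums)
--     initial_range = initial_max - initial_min
--     if k >= initial_range:
--         return initial_range
--     # Remove duplicates
--     unique_nums = set(nums)
--     num_shifted_pairs = _create_num_shift_pairs(
--         unique_nums, k, initial_min, initial_max
--     )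
--     num_shifted_pairs.sort(key=lambda t: t.shifted_num)
--     smallest_range = initial_range
--     unique_nums_len = len(unique_nums)
--     covered_nums = {}
--     left_index = right_index = 0
--     while True:
--         left_index, right_index = _get_next_range(
--             num_shifted_pairs, unique_nums_len, left_index, right_index, covered_nums
--         )
--         if right_index is None:
--             break
--         new_range = num_shifted_pairs[right_index].shifted_num - num_shifted_pairs[left_index].shifted_num
--         if new_range < smallest_range:
--             smallest_range = new_range
--         left_key = num_shifted_pairs[left_index].num
--         covered_nums.pop(left_key)
--         left_index += 1
--         right_index += 1
--     return smallest_range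
--
-- def _get_next_range(
--     num_shifted_pairs: List[NumShiftedNumPair],
--     unique_nums_len: int,
--     left_index: int,
--     right_index: int,
--     covered_nums: Set[int],
-- ) -> Tuple[Optional[int], Optional[int]]:
--     while right_index < len(num_shifted_pairs):
--         right_key = num_shifted_pairs[right_index].num
--         if right_key in covered_nums:
--             covered_nums[right_key] += 1
--         else:
--             covered_nums[right_key] = 1
--         if len(covered_nums) < unique_nums_len:
--             right_index += 1
--         else:
--             break
--     if len(covered_nums) != unique_nums_len:
--         return None, None
--     while covered_nums[num_shifted_pairs[left_index].num] == 2: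
--         covered_nums[num_shifted_pairs[left_index].num] = 1
--         left_index += 1
--     return left_index, right_index
--
-- def _create_num_shift_pairs(
--     nums: Set[int], k: int, initial_min: int, initial_max: int
-- ) -> List[NumShiftedNumPair]:
--     pairs = []
--     for num in nums:
--         if num == initial_min:
--             pairs.append(NumShiftedNumPair(num, num + k))
--         elif num == initial_max:
--             pairs.append(NumShiftedNumPair(num, num - k))
--         else:
--             pairs.extend([NumShiftedNumPair(num, num - k), NumShiftedNumPair(num, num + k)])
--     return pairs
-- ===== SOURCE B (Python) =====
-- def smallest_range_2(nums, k):
--     initial_min, initial_max = min(nums), max(nums)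
--     initial_range = initial_max - initial_min
--     if k >= initial_range:
--         return initial_range
--     s = sorted(nums)
--     best = initial_range
--     for i in range(len(s) - 1):
--         high = max(s[i] + k, s[-1] - k)
--         low = min(s[0] + k, s[i + 1] - k)
--         if high - low < best:
--             best = high - low
--     return best
-- ===== Notes on version B (the rewrite author's own statement) =====
-- stated objective: simpler
-- what changed: Replaces A's dedup + shifted-pair list + stable sort + two-pointer minimal-covering-window scan with the canonical split-point method: sort nums once and take the best of max(s[i]+k, s[-1]-k) - min(s[0]+k, s[i+1]-k) over all adjacent split points.
import Mathlib
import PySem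

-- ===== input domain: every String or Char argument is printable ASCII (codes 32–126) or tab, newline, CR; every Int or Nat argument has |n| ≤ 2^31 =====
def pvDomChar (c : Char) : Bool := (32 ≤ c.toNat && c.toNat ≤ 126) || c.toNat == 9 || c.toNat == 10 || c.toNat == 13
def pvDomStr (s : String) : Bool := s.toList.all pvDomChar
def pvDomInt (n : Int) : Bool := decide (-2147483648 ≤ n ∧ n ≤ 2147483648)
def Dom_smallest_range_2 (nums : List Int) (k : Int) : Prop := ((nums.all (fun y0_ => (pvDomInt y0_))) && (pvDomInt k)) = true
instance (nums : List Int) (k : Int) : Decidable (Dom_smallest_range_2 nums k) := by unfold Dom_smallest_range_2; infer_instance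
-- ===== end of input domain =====

-- B replaces A's dedup + shifted-pair + two-pointer covering-window scan by the canonical
-- split-point scan over the sorted list (simpler, same O(n log n) cost).

-- ===== PORT A =====

-- _create_num_shift_pairs: loop with append/extend → foldl appending blocks
def mkPairs (uniq : List Int) (k mn mx : Int) : List (Int × Int) :=
  uniq.foldl (fun acc v =>
    if v = mn then acc ++ [(v, v + k)]
    else if v = mx then acc ++ [(v, v - k)]
    else acc ++ [(v, v - k), (v, v + k)]) []

-- first while of _get_next_range: extend right_index, counting keys in covered.
-- pairs[right_index] is read with getD: the guard r < pairs.length matches Python's loop condition.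
def fillRight (pairs : List (Int × Int)) (u : Nat) (r : Nat) (cov : PySem.Dict Int Int) :
    Nat × PySem.Dict Int Int :=
  if h : r < pairs.length then
    let key := (pairs.getD r (0, 0)).1
    let cov' := if PySem.Dict.contains cov key then PySem.Dict.insert cov key (PySem.Dict.getD cov key 0 + 1)
                else PySem.Dict.insert cov key 1
    if cov'.size < u then fillRight pairs u (r + 1) cov'
    else (r, cov')
  else (r, cov)
termination_by pairs.length - r

-- second while of _get_next_range: shrink from the left while the count is 2.
-- covered[...] is read with getD 0 and the index is guarded by l < pairs.length: in every
-- reachable state the key is present and l stays in range (proved below), so this is exact.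
def shrinkLeft (pairs : List (Int × Int)) (l : Nat) (cov : PySem.Dict Int Int) :
    Nat × PySem.Dict Int Int :=
  if h : l < pairs.length then
    let key := (pairs.getD l (0, 0)).1
    if PySem.Dict.getD cov key 0 = 2 then shrinkLeft pairs (l + 1) (PySem.Dict.insert cov key 1)
    else (l, cov)
  else (l, cov)
termination_by pairs.length - l

-- the outer 'while True' loop; fuel = pairs.length + 2 outer iterations always suffices
-- (right_index grows by at least one per iteration), so the fuel-0 branch is never reached.
def mainLoop (pairs : List (Int × Int)) (u : Nat) :
    Nat → Nat → Nat → PySem.Dict Int Int → Int → Int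
  | 0, _, _, _, best => best
  | fuel + 1, l, r, cov, best =>
    let rc' := fillRight pairs u r cov
    if rc'.2.size ≠ u then best
    else
      let lc' := shrinkLeft pairs l rc'.2
      let newRange := (pairs.getD rc'.1 (0, 0)).2 - (pairs.getD lc'.1 (0, 0)).2
      let best' := if newRange < best then newRange else best
      let cov''' := PySem.Dict.erase lc'.2 (pairs.getD lc'.1 (0, 0)).1
      mainLoop pairs u fuel (lc'.1 + 1) (rc'.1 + 1) cov''' best'

def smallest_range_2 (nums : List Int) (k : Int) : Int :=
  match PySem.List.min? nums (fun x => x), PySem.List.max? nums (fun x => x) with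
  | some mn, some mx =>
      let r0 := mx - mn
      if k ≥ r0 then r0
      else
        let uniq := PySem.Set.ofList nums
        let pairs := PySem.List.sorted (mkPairs uniq k mn mx) (fun t => t.2) false
        mainLoop pairs uniq.length (pairs.length + 2) 0 0 (PySem.Dict.mk []) r0
  | _, _ => 0  -- nums = []: Python raises ValueError (min of empty); excluded by Pre_

-- ===== PORT B =====

def smallest_range_2_alt (nums : List Int) (k : Int) : Int :=
  match PySem.List.min? nums (fun x => x) with
  | none => 0  -- nums = []: Python raises ValueError; excluded by Pre_
  | some mn =>
    match PySem.List.max? nums (fun x => x) with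
    | none => 0
    | some mx =>
      let r0 := mx - mn
      if k ≥ r0 then r0
      else
        let s := PySem.List.sorted nums (fun x => x) false
        (PySem.List.pyRange 0 ((s.length : Int) - 1) 1).foldl
          (fun best i =>
            let high := max (PySem.List.pyGetD s i 0 + k) (PySem.List.pyGetD s (-1) 0 - k)
            let low := min (PySem.List.pyGetD s 0 0 + k) (PySem.List.pyGetD s (i + 1) 0 - k)
            if high - low < best then high - low else best) r0

-- ===== PRECONDITION & SPEC =====
-- Pre_ excludes only the empty list, on which both Pythons raise ValueError (min of empty sequence).
def Pre_smallest_range_2 (nums : List Int) (k : Int) : Prop := nums ≠ []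
instance (nums : List Int) (k : Int) : Decidable (Pre_smallest_range_2 nums k) := by
  unfold Pre_smallest_range_2; infer_instance

def pvWitness_smallest_range_2 : List Int × Int := ([1, 5, 3, 1], 2)

def Spec_smallest_range_2 (nums : List Int) (k : Int) (out : Int) : Prop := out = smallest_range_2_alt nums k
instance (nums : List Int) (k : Int) (out : Int) : Decidable (Spec_smallest_range_2 nums k out) := by unfold Spec_smallest_range_2; infer_instance

-- ===== CLAIM (what is proved, stated in full; the proofs are below) =====
def Claim_equal_smallest_range_2 : Prop := ∀ (nums : List Int) (k : Int), Dom_smallest_range_2 nums k → Pre_smallest_range_2 nums k → Spec_smallest_range_2 nums k (smallest_range_2 nums k)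

-- ===== LEMMAS AND PROOFS =====

def wc (pairs : List (Int × Int)) (l r : Nat) (v : Int) : Nat :=
  ((pairs.take r).drop l).countP (fun p => decide (p.1 = v))

def CovW (U : List Int) (pairs : List (Int × Int)) (l r : Nat) : Prop :=
  ∀ v ∈ U, 0 < wc pairs l r v

def CI (pairs : List (Int × Int)) (l r : Nat) (cov : PySem.Dict Int Int) : Prop :=
  (cov.items.map Prod.fst).Nodup ∧
  (∀ v : Int, v ∈ cov.items.map Prod.fst ↔ 0 < wc pairs l r v) ∧
  (∀ p ∈ cov.items, p.2 = (wc pairs l r p.1 : Int))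

lemma wc_pos_iff (pairs : List (Int × Int)) (l r : Nat) (v : Int) :
    0 < wc pairs l r v ↔ ∃ j, l ≤ j ∧ j < r ∧ j < pairs.length ∧ (pairs.getD j (0,0)).1 = v := by
  rw [wc, List.countP_pos_iff]
  constructor
  · rintro ⟨p, hp, hpv⟩
    rw [List.mem_iff_getElem] at hp
    obtain ⟨j, hj, hje⟩ := hp
    refine ⟨l + j, Nat.le_add_right _ _, ?_, ?_, ?_⟩
    · have := hj
      simp [List.length_drop, List.length_take] at this
      omega
    · have := hj
      simp [List.length_drop, List.length_take] at this
      omega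
    · have hlen : l + j < pairs.length := by
        have := hj; simp [List.length_drop, List.length_take] at this; omega
      have : ((pairs.take r).drop l)[j] = pairs[l + j] := by
        rw [List.getElem_drop, List.getElem_take]
      rw [this] at hje
      rw [List.getD_eq_getElem?_getD, List.getElem?_eq_getElem hlen]
      simpa using hje ▸ (by simpa using hpv)
  · rintro ⟨j, hlj, hjr, hjl, hv⟩
    refine ⟨pairs[j], ?_, ?_⟩
    · rw [List.mem_iff_getElem]
      refine ⟨j - l, ?_, ?_⟩
      · simp [List.length_drop, List.length_take]; omega
      · rw [List.getElem_drop, List.getElem_take]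
        congr 1; omega
    · rw [List.getD_eq_getElem?_getD, List.getElem?_eq_getElem hjl] at hv
      simpa using hv

lemma wc_mono_r (pairs : List (Int × Int)) (l : Nat) {r r' : Nat} (h : r ≤ r') (v : Int) :
    wc pairs l r v ≤ wc pairs l r' v := by
  unfold wc
  rw [List.drop_take, List.drop_take]
  have hsub : ((pairs.drop l).take (r - l)).Sublist ((pairs.drop l).take (r' - l)) :=
    List.take_sublist_take_left (by omega)
  exact hsub.countP_le

lemma wc_mono_l (pairs : List (Int × Int)) {l l' : Nat} (r : Nat) (h : l ≤ l') (v : Int) :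
    wc pairs l' r v ≤ wc pairs l r v := by
  unfold wc
  have : (pairs.take r).drop l' = ((pairs.take r).drop l).drop (l' - l) := by
    rw [List.drop_drop]; congr 1; omega
  rw [this]
  exact (List.drop_sublist _ _).countP_le

lemma wc_succ_r (pairs : List (Int × Int)) {l r : Nat} (hlr : l ≤ r) (hr : r < pairs.length) (v : Int) :
    wc pairs l (r+1) v = wc pairs l r v + (if (pairs.getD r (0,0)).1 = v then 1 else 0) := by
  unfold wc
  rw [List.take_add_one, List.getElem?_eq_getElem hr]
  rw [List.drop_append_of_le_length (by simp; omega)]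
  rw [List.countP_append]
  simp [List.getD_eq_getElem?_getD, List.getElem?_eq_getElem hr]

lemma wc_succ_l (pairs : List (Int × Int)) {l r : Nat} (hlr : l < r) (hl : l < pairs.length) (v : Int) :
    wc pairs l r v = (if (pairs.getD l (0,0)).1 = v then 1 else 0) + wc pairs (l+1) r v := by
  unfold wc
  have hlt : l < (pairs.take r).length := by simp; omega
  rw [List.drop_eq_getElem_cons hlt, List.countP_cons]
  rw [List.getElem_take]
  simp [List.getD_eq_getElem?_getD, List.getElem?_eq_getElem hl]
  split <;> simp_all [Nat.add_comm]

lemma ci_getD {pairs : List (Int × Int)} {l r : Nat} {cov : PySem.Dict Int Int}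
    (h : CI pairs l r cov) (v : Int) :
    PySem.Dict.getD cov v 0 = (wc pairs l r v : Int) := by
  obtain ⟨hN, hM, hV⟩ := h
  by_cases hc : v ∈ cov.items.map Prod.fst
  · obtain ⟨p, hp, hpv⟩ := List.mem_map.mp hc
    have hp' : (v, p.2) ∈ cov.items := by
      have : p = (v, p.2) := by cases p; simp_all
      rwa [this] at hp
    rw [PySem.Dict.getD_of_mem_items cov hp' hN]
    exact hpv ▸ hV p hp
  · have hwc : wc pairs l r v = 0 := by
      by_contra hne
      exact hc ((hM v).mpr (Nat.pos_of_ne_zero hne))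
    rw [hwc]
    refine PySem.Dict.getD_of_not_contains cov 0 ?_
    rw [← Bool.not_eq_true, PySem.Dict.contains_iff_mem_keys]
    exact hc
  
lemma ci_size (U : List Int) {pairs : List (Int × Int)} {l r : Nat} {cov : PySem.Dict Int Int}
    (h : CI pairs l r cov) (hU : U.Nodup)
    (hkeys : ∀ p ∈ pairs, p.1 ∈ U) :
    cov.size ≤ U.length ∧ (cov.size = U.length ↔ CovW U pairs l r) := by
  obtain ⟨hN, hM, hV⟩ := h
  have hsub : (cov.items.map Prod.fst) ⊆ U := by
    intro v hv
    have := (hM v).mp hv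
    obtain ⟨j, _, _, hjl, hkey⟩ := (wc_pos_iff pairs l r v).mp this
    have : pairs.getD j (0,0) ∈ pairs := by
      rw [List.getD_eq_getElem?_getD, List.getElem?_eq_getElem hjl]
      simp [List.getElem_mem]
    exact hkey ▸ hkeys _ this
  have hsp : (cov.items.map Prod.fst).Subperm U := hN.subperm hsub
  have hlen : cov.size = (cov.items.map Prod.fst).length := by
    simp [PySem.Dict.size]
  constructor
  · rw [hlen]; exact hsp.length_le
  · constructor
    · intro hsz v hvU
      have hperm := hsp.perm_of_length_le (by omega)
      exact (hM v).mp (hperm.mem_iff.mpr hvU)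
    · intro hcov
      have hsub2 : U ⊆ cov.items.map Prod.fst := fun v hv => (hM v).mpr (hcov v hv)
      have := (hU.subperm hsub2).length_le
      have := hsp.length_le
      omega

lemma keys_map_overwrite (items : List (Int × Int)) (k0 : Int) (c : Int) :
    (items.map (fun p => if (p.1 == k0) = true then (k0, c) else p)).map Prod.fst
      = items.map Prod.fst := by
  rw [List.map_map]
  refine List.map_congr_left ?_
  intro p _
  by_cases h : p.1 = k0 <;> simp [h]

lemma ci_step_r {pairs : List (Int × Int)} {l r : Nat} {cov : PySem.Dict Int Int}
    (h : CI pairs l r cov) (hlr : l ≤ r) (hr : r < pairs.length) :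
    CI pairs l (r+1)
      (if PySem.Dict.contains cov ((pairs.getD r (0,0)).1)
       then PySem.Dict.insert cov ((pairs.getD r (0,0)).1)
              (PySem.Dict.getD cov ((pairs.getD r (0,0)).1) 0 + 1)
       else PySem.Dict.insert cov ((pairs.getD r (0,0)).1) 1) := by
  obtain ⟨hN, hM, hV⟩ := h
  set k0 := (pairs.getD r (0,0)).1 with hk0
  have hwc : ∀ v, wc pairs l (r+1) v = wc pairs l r v + (if k0 = v then 1 else 0) := by
    intro v; rw [wc_succ_r pairs hlr hr]
  by_cases hc : PySem.Dict.contains cov k0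
  · rw [if_pos hc]
    have hitems := PySem.Dict.items_insert_of_contains cov
      (PySem.Dict.getD cov k0 0 + 1) hc
    have hkeq := keys_map_overwrite cov.items k0 (PySem.Dict.getD cov k0 0 + 1)
    have hk0mem : k0 ∈ cov.items.map Prod.fst := by
      have := (PySem.Dict.contains_iff_mem_keys cov k0).mp hc
      simpa [PySem.Dict.keys] using this
    have hk0wc : 0 < wc pairs l r k0 := (hM k0).mp hk0mem
    refine ⟨?_, ?_, ?_⟩
    · rw [hitems, hkeq]; exact hN
    · intro v
      rw [hitems, hkeq, hwc v]
      by_cases hv : k0 = v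
      · subst hv; simp [hk0mem]
      · simp [if_neg hv, hM v]
    · intro p hp
      rw [hitems] at hp
      obtain ⟨q, hq, hqe⟩ := List.mem_map.mp hp
      by_cases hqk : q.1 = k0
      · have : p = (k0, PySem.Dict.getD cov k0 0 + 1) := by
          rw [← hqe]; simp [hqk]
        rw [this]
        have := ci_getD ⟨hN, hM, hV⟩ k0
        simp [hwc k0, this]
      · have : p = q := by rw [← hqe, if_neg (by simpa using hqk)]
        rw [this, hwc q.1, if_neg (fun h => hqk (Eq.symm h))]
        simpa using hV q hq
  · rw [if_neg hc]
    have hitems := PySem.Dict.items_insert_of_not_contains cov 1 (by simpa using hc)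
    have hk0nmem : k0 ∉ cov.items.map Prod.fst := by
      intro hmem
      exact hc ((PySem.Dict.contains_iff_mem_keys cov k0).mpr (by simpa [PySem.Dict.keys] using hmem))
    have hk0wc : wc pairs l r k0 = 0 := by
      by_contra hne
      exact hk0nmem ((hM k0).mpr (Nat.pos_of_ne_zero hne))
    refine ⟨?_, ?_, ?_⟩
    · rw [hitems]
      rw [List.map_append]
      refine List.Nodup.append hN (List.nodup_singleton _) ?_
      intro a ha hb
      rw [List.map_cons, List.map_nil, List.mem_singleton] at hb
      have : a = k0 := hb
      exact hk0nmem (this ▸ ha)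
    · intro v
      rw [hitems, hwc v]
      simp only [List.map_append, List.map_cons, List.map_nil, List.mem_append,
        List.mem_singleton]
      by_cases hv : v = k0
      · subst hv; simp [hk0wc]
      · rw [if_neg (fun h : k0 = v => hv (Eq.symm h))]
        simp [hv, hM v]
    · intro p hp
      rw [hitems] at hp
      rcases List.mem_append.mp hp with hp | hp
      · rw [hwc p.1]
        have hpk : p.1 ≠ k0 := by
          intro he
          exact hk0nmem (he ▸ List.mem_map_of_mem hp)
        rw [if_neg (fun h => hpk h.symm)]
        simpa using hV p hp
      · rw [List.mem_singleton] at hp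
        rw [hp]
        simp [hwc, hk0wc]

lemma ci_step_shrink {pairs : List (Int × Int)} {l r : Nat} {cov : PySem.Dict Int Int}
    (h : CI pairs l r cov) (hlr : l < r) (hl : l < pairs.length)
    (h2 : wc pairs l r ((pairs.getD l (0,0)).1) = 2) :
    CI pairs (l+1) r (PySem.Dict.insert cov ((pairs.getD l (0,0)).1) 1) := by
  obtain ⟨hN, hM, hV⟩ := h
  set k0 := (pairs.getD l (0,0)).1 with hk0
  have hwc : ∀ v, wc pairs l r v = (if k0 = v then 1 else 0) + wc pairs (l+1) r v := by
    intro v; rw [wc_succ_l pairs hlr hl]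
  have hk0mem : k0 ∈ cov.items.map Prod.fst := (hM k0).mpr (by omega)
  have hc : PySem.Dict.contains cov k0 :=
    (PySem.Dict.contains_iff_mem_keys cov k0).mpr (by simpa [PySem.Dict.keys] using hk0mem)
  have hitems := PySem.Dict.items_insert_of_contains cov (1 : Int) hc
  have hkeq := keys_map_overwrite cov.items k0 1
  refine ⟨?_, ?_, ?_⟩
  · rw [hitems, hkeq]; exact hN
  · intro v
    rw [hitems, hkeq]
    by_cases hv : v = k0
    · rw [hv]
      have h1 : wc pairs (l+1) r k0 = 1 := by
        have := hwc k0; rw [if_pos rfl] at this; omega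
      simp [hk0mem, h1]
    · have : wc pairs (l+1) r v = wc pairs l r v := by
        have := hwc v; rw [if_neg (fun h => hv h.symm)] at this; omega
      rw [this]; exact hM v
  · intro p hp
    rw [hitems] at hp
    obtain ⟨q, hq, hqe⟩ := List.mem_map.mp hp
    by_cases hqk : q.1 = k0
    · have : p = (k0, 1) := by rw [← hqe]; simp [hqk]
      rw [this]
      have h1 : wc pairs (l+1) r k0 = 1 := by have := hwc k0; simp at this; omega
      simp [h1]
    · have : p = q := by rw [← hqe, if_neg (by simpa using hqk)]
      rw [this]
      have : wc pairs (l+1) r q.1 = wc pairs l r q.1 := by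
        have := hwc q.1; rw [if_neg (fun h => hqk h.symm)] at this; omega
      rw [this]
      exact hV q hq

lemma ci_step_erase {pairs : List (Int × Int)} {l r : Nat} {cov : PySem.Dict Int Int}
    (h : CI pairs l r cov) (hlr : l < r) (hl : l < pairs.length)
    (h1 : wc pairs l r ((pairs.getD l (0,0)).1) = 1) :
    CI pairs (l+1) r (PySem.Dict.erase cov ((pairs.getD l (0,0)).1)) := by
  obtain ⟨hN, hM, hV⟩ := h
  set k0 := (pairs.getD l (0,0)).1 with hk0
  have hwc : ∀ v, wc pairs l r v = (if k0 = v then 1 else 0) + wc pairs (l+1) r v := by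
    intro v; rw [wc_succ_l pairs hlr hl]
  have hitems : (PySem.Dict.erase cov k0).items = cov.items.filter (fun p => !(p.1 == k0)) := rfl
  have hsub : ((PySem.Dict.erase cov k0).items.map Prod.fst).Sublist (cov.items.map Prod.fst) := by
    rw [hitems]; exact List.Sublist.map _ List.filter_sublist
  refine ⟨hsub.nodup hN, ?_, ?_⟩
  · intro v
    rw [hitems]
    constructor
    · intro hv
      obtain ⟨p, hp, hpv⟩ := List.mem_map.mp hv
      rw [List.mem_filter] at hp
      have hne : v ≠ k0 := by
        intro he; subst he
        simp [hpv] at hp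
      have hmem : v ∈ cov.items.map Prod.fst := List.mem_map.mpr ⟨p, hp.1, hpv⟩
      have := (hM v).mp hmem
      have := hwc v
      rw [if_neg (fun h => hne h.symm)] at this
      omega
    · intro hv
      have hne : v ≠ k0 := by
        intro he
        have h' := hwc k0; rw [if_pos rfl] at h'
        rw [he] at hv; omega
      have : 0 < wc pairs l r v := by
        have := hwc v; rw [if_neg (fun h => hne h.symm)] at this; omega
      obtain ⟨p, hp, hpv⟩ := List.mem_map.mp ((hM v).mpr this)
      exact List.mem_map.mpr ⟨p, List.mem_filter.mpr ⟨hp, by simp [hpv, hne]⟩, hpv⟩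
  · intro p hp
    rw [hitems, List.mem_filter] at hp
    have hne : p.1 ≠ k0 := by simpa using hp.2
    have : wc pairs (l+1) r p.1 = wc pairs l r p.1 := by
      have := hwc p.1; rw [if_neg (fun h => hne h.symm)] at this; omega
    rw [this]
    exact hV p hp.1

lemma wc_le_total (pairs : List (Int × Int)) (l r : Nat) (v : Int) :
    wc pairs l r v ≤ pairs.countP (fun p => decide (p.1 = v)) := by
  unfold wc
  exact List.Sublist.countP_le ((List.drop_sublist _ _).trans (List.take_sublist _ _))

lemma fill_spec (U : List Int) (pairs : List (Int × Int)) (hU : U.Nodup)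
    (hkeys : ∀ p ∈ pairs, p.1 ∈ U) (l : Nat) (r : Nat) (cov : PySem.Dict Int Int)
    (hCI : CI pairs l r cov) (hlr : l ≤ r) (hNC : ¬ CovW U pairs l r) :
    r ≤ (fillRight pairs U.length r cov).1 ∧
    ( ((fillRight pairs U.length r cov).2.size = U.length ∧
        (fillRight pairs U.length r cov).1 < pairs.length ∧
        CI pairs l ((fillRight pairs U.length r cov).1 + 1) (fillRight pairs U.length r cov).2 ∧
        CovW U pairs l ((fillRight pairs U.length r cov).1 + 1) ∧
        ¬ CovW U pairs l (fillRight pairs U.length r cov).1)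
      ∨ ((fillRight pairs U.length r cov).2.size ≠ U.length ∧
         pairs.length ≤ (fillRight pairs U.length r cov).1 ∧
         CI pairs l (fillRight pairs U.length r cov).1 (fillRight pairs U.length r cov).2) ) := by
  fun_induction fillRight pairs U.length r cov with
  | case1 r cov h key cov' hlt ih =>
    have hCI' : CI pairs l (r + 1) cov' := ci_step_r hCI hlr h
    have hNC' : ¬ CovW U pairs l (r + 1) := by
      intro hc
      have := (ci_size U hCI' hU hkeys).2.mpr hc
      omega
    have := ih hCI' (by omega) hNC'
    exact ⟨by omega, this.2⟩
  | case2 r cov h key cov' hlt =>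
    have hCI' : CI pairs l (r + 1) cov' := ci_step_r hCI hlr h
    have hle := (ci_size U hCI' hU hkeys).1
    have heq : cov'.size = U.length := by omega
    refine ⟨le_refl _, Or.inl ⟨heq, h, hCI', ?_, hNC⟩⟩
    exact (ci_size U hCI' hU hkeys).2.mp heq
  | case3 r cov h =>
    refine ⟨le_refl _, Or.inr ⟨?_, by omega, hCI⟩⟩
    intro hsz
    exact hNC ((ci_size U hCI hU hkeys).2.mp hsz)

lemma shrink_spec (U : List Int) (pairs : List (Int × Int))
    (htwo : ∀ v, pairs.countP (fun p => decide (p.1 = v)) ≤ 2)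
    (hUne : U ≠ []) (r : Nat)
    (l : Nat) (cov : PySem.Dict Int Int)
    (hCI : CI pairs l r cov) (hCov : CovW U pairs l r) :
    l ≤ (shrinkLeft pairs l cov).1 ∧ (shrinkLeft pairs l cov).1 < r ∧
    CI pairs (shrinkLeft pairs l cov).1 r (shrinkLeft pairs l cov).2 ∧
    CovW U pairs (shrinkLeft pairs l cov).1 r ∧
    wc pairs (shrinkLeft pairs l cov).1 r ((pairs.getD (shrinkLeft pairs l cov).1 (0,0)).1) = 1 := by
  have hlr : l < r := by
    obtain ⟨v, hv⟩ := List.exists_mem_of_ne_nil U hUne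
    obtain ⟨j, hj1, hj2, _, _⟩ := (wc_pos_iff pairs l r v).mp (hCov v hv)
    omega
  fun_induction shrinkLeft pairs l cov with
  | case1 l cov h key h2 ih =>
    have hwc2 : wc pairs l r key = 2 := by
      have := ci_getD hCI key
      rw [h2] at this
      omega
    have hCI' : CI pairs (l+1) r (PySem.Dict.insert cov key 1) := by
      exact ci_step_shrink hCI hlr h hwc2
    have hCov' : CovW U pairs (l+1) r := by
      intro v hv
      have hstep := wc_succ_l pairs hlr h v
      by_cases hveq : key = v
      · rw [← hveq] at hstep ⊢
        rw [if_pos rfl] at hstep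
        omega
      · rw [if_neg hveq] at hstep
        have := hCov v hv
        omega
    have hlr' : l + 1 < r := by
      obtain ⟨v, hv⟩ := List.exists_mem_of_ne_nil U hUne
      obtain ⟨j, hj1, hj2, _, _⟩ := (wc_pos_iff pairs (l+1) r v).mp (hCov' v hv)
      omega
    have := ih hCI' hCov' hlr'
    exact ⟨le_trans (Nat.le_succ l) this.1, this.2⟩
  | case2 l cov h key h2 =>
    have hmem : 0 < wc pairs l r key :=
      (wc_pos_iff pairs l r key).mpr ⟨l, le_refl _, hlr, h, rfl⟩
    have hle2 : wc pairs l r key ≤ 2 := le_trans (wc_le_total pairs l r key) (htwo key)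
    have hne2 : wc pairs l r key ≠ 2 := by
      intro hc
      have := ci_getD hCI key
      rw [hc] at this
      exact h2 (by rw [this]; norm_num)
    exact ⟨le_refl _, hlr, hCI, hCov, by show wc pairs l r key = 1; omega⟩
  | case3 l cov h =>
    exfalso
    obtain ⟨v, hv⟩ := List.exists_mem_of_ne_nil U hUne
    obtain ⟨j, hj1, hj2, hj3, _⟩ := (wc_pos_iff pairs l r v).mp (hCov v hv)
    omega

lemma ci_step_erase' {pairs : List (Int × Int)} {l r : Nat} {cov : PySem.Dict Int Int}
    (h : CI pairs l r cov) (hlr : l < r) (hl : l < pairs.length)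
    (h1 : wc pairs l r ((pairs.getD l (0,0)).1) = 1) :
    ¬ (0 < wc pairs (l+1) r ((pairs.getD l (0,0)).1)) := by
  have := wc_succ_l pairs hlr hl ((pairs.getD l (0,0)).1)
  rw [if_pos rfl] at this
  omega

lemma main_lower (U : List Int) (pairs : List (Int × Int)) (alt : Int)
    (hU : U.Nodup) (hkeys : ∀ p ∈ pairs, p.1 ∈ U)
    (htwo : ∀ v, pairs.countP (fun p => decide (p.1 = v)) ≤ 2) (hUne : U ≠ [])
    (halt : ∀ lc rc : Nat, lc ≤ rc → rc < pairs.length → CovW U pairs lc (rc+1) →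
      alt ≤ (pairs.getD rc (0,0)).2 - (pairs.getD lc (0,0)).2) :
    ∀ (fuel : Nat) (l r : Nat) (cov : PySem.Dict Int Int) (best : Int),
      CI pairs l r cov → l ≤ r → ¬ CovW U pairs l r → alt ≤ best →
      alt ≤ mainLoop pairs U.length fuel l r cov best := by
  intro fuel
  induction fuel with
  | zero => intro l r cov best _ _ _ hb; simpa [mainLoop] using hb
  | succ fuel ih =>
    intro l r cov best hCI hlr hNC hb
    have hfill := fill_spec U pairs hU hkeys l r cov hCI hlr hNC
    simp only [mainLoop]
    by_cases hsz : (fillRight pairs U.length r cov).2.size ≠ U.length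
    · rw [if_pos hsz]; exact hb
    · rw [if_neg hsz]
      push_neg at hsz
      rcases hfill.2 with hA | hB
      swap
      · exact absurd hsz hB.1
      obtain ⟨_, hrlen, hCI1, hCov1, _⟩ := hA
      have hrr := hfill.1
      have hshr := shrink_spec U pairs htwo hUne ((fillRight pairs U.length r cov).1 + 1)
        l (fillRight pairs U.length r cov).2 hCI1 hCov1
      set r' := (fillRight pairs U.length r cov).1 with hr'
      set SL := shrinkLeft pairs l (fillRight pairs U.length r cov).2 with hSL
      obtain ⟨hll', hl'r, hCI2, hCov2, hwc1⟩ := hshr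
      have hl'len : SL.1 < pairs.length := by omega
      have hnewr : alt ≤ (pairs.getD r' (0,0)).2 - (pairs.getD SL.1 (0,0)).2 :=
        halt SL.1 r' (by omega) hrlen hCov2
      have hCI3 : CI pairs (SL.1 + 1) (r' + 1) (PySem.Dict.erase SL.2 ((pairs.getD SL.1 (0,0)).1)) :=
        ci_step_erase hCI2 hl'r hl'len hwc1
      have hNC3 : ¬ CovW U pairs (SL.1 + 1) (r' + 1) := by
        intro hc
        have hkmem : (pairs.getD SL.1 (0,0)).1 ∈ U := by
          refine hkeys _ ?_
          rw [List.getD_eq_getElem?_getD, List.getElem?_eq_getElem hl'len]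
          simp [List.getElem_mem]
        exact ci_step_erase' hCI2 hl'r hl'len hwc1 (hc _ hkmem)
      refine ih (SL.1 + 1) (r' + 1) _ _ hCI3 (by omega) hNC3 ?_
      split <;> omega

lemma covw_mono {U : List Int} {pairs : List (Int × Int)} {l l' r r' : Nat}
    (hl : l ≤ l') (hr : r' ≤ r) (h : CovW U pairs l' r') : CovW U pairs l r := by
  intro v hv
  have h1 := wc_mono_l pairs r' hl v
  have h2 := wc_mono_r pairs l hr v
  have := h v hv
  omega

lemma main_upper (U : List Int) (pairs : List (Int × Int))
    (hU : U.Nodup) (hkeys : ∀ p ∈ pairs, p.1 ∈ U)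
    (htwo : ∀ v, pairs.countP (fun p => decide (p.1 = v)) ≤ 2) (hUne : U ≠ [])
    (hmono : ∀ p q : Nat, p ≤ q → q < pairs.length →
      (pairs.getD p (0,0)).2 ≤ (pairs.getD q (0,0)).2) :
    ∀ (fuel : Nat) (l r : Nat) (cov : PySem.Dict Int Int) (best : Int),
      CI pairs l r cov → l ≤ r → ¬ CovW U pairs l r →
      (∀ lc rc : Nat, lc ≤ rc → rc < pairs.length → lc < l → CovW U pairs lc (rc+1) →
        best ≤ (pairs.getD rc (0,0)).2 - (pairs.getD lc (0,0)).2) →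
      pairs.length + 1 ≤ fuel + r →
      mainLoop pairs U.length fuel l r cov best ≤ best ∧
      (∀ lc rc : Nat, lc ≤ rc → rc < pairs.length → CovW U pairs lc (rc+1) →
        mainLoop pairs U.length fuel l r cov best ≤ (pairs.getD rc (0,0)).2 - (pairs.getD lc (0,0)).2) := by
  intro fuel
  induction fuel with
  | zero =>
    intro l r cov best hCI hlr hNC Hh Hf
    simp only [mainLoop]
    refine ⟨le_refl _, ?_⟩
    intro lc rc hlcrc hrclen hCov
    by_cases hcl : lc < l
    · exact Hh lc rc hlcrc hrclen hcl hCov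
    · exfalso
      exact hNC (covw_mono (by omega) (by omega) hCov)
  | succ fuel ih =>
    intro l r cov best hCI hlr hNC Hh Hf
    have hfill := fill_spec U pairs hU hkeys l r cov hCI hlr hNC
    simp only [mainLoop]
    by_cases hsz : (fillRight pairs U.length r cov).2.size ≠ U.length
    · rw [if_pos hsz]
      rcases hfill.2 with hA | hB
      · exact absurd hA.1 hsz
      obtain ⟨_, hlenr, hCIB⟩ := hB
      have hNCB : ¬ CovW U pairs l (fillRight pairs U.length r cov).1 := by
        intro hc
        exact hsz ((ci_size U hCIB hU hkeys).2.mpr hc)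
      refine ⟨le_refl _, ?_⟩
      intro lc rc hlcrc hrclen hCov
      by_cases hcl : lc < l
      · exact Hh lc rc hlcrc hrclen hcl hCov
      · exfalso
        exact hNCB (covw_mono (by omega) (by omega) hCov)
    · rw [if_neg hsz]
      push_neg at hsz
      rcases hfill.2 with hA | hB
      swap
      · exact absurd hsz hB.1
      obtain ⟨_, hrlen, hCI1, hCov1, hNC1⟩ := hA
      have hrr := hfill.1
      have hshr := shrink_spec U pairs htwo hUne ((fillRight pairs U.length r cov).1 + 1)
        l (fillRight pairs U.length r cov).2 hCI1 hCov1
      set r' := (fillRight pairs U.length r cov).1 with hr'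
      set SL := shrinkLeft pairs l (fillRight pairs U.length r cov).2 with hSL
      obtain ⟨hll', hl'r, hCI2, hCov2, hwc1⟩ := hshr
      have hl'len : SL.1 < pairs.length := by omega
      have hCI3 : CI pairs (SL.1 + 1) (r' + 1) (PySem.Dict.erase SL.2 ((pairs.getD SL.1 (0,0)).1)) :=
        ci_step_erase hCI2 hl'r hl'len hwc1
      have hNC3 : ¬ CovW U pairs (SL.1 + 1) (r' + 1) := by
        intro hc
        have hkmem : (pairs.getD SL.1 (0,0)).1 ∈ U := by
          refine hkeys _ ?_
          rw [List.getD_eq_getElem?_getD, List.getElem?_eq_getElem hl'len]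
          simp [List.getElem_mem]
        exact ci_step_erase' hCI2 hl'r hl'len hwc1 (hc _ hkmem)
      set newRange := (pairs.getD r' (0,0)).2 - (pairs.getD SL.1 (0,0)).2 with hnewR
      set best' := if newRange < best then newRange else best with hbest'
      have hb'le : best' ≤ best := by rw [hbest']; split <;> omega
      have hb'newr : best' ≤ newRange := by rw [hbest']; split <;> omega
      have Hh3 : ∀ lc rc : Nat, lc ≤ rc → rc < pairs.length → lc < SL.1 + 1 →
          CovW U pairs lc (rc+1) → best' ≤ (pairs.getD rc (0,0)).2 - (pairs.getD lc (0,0)).2 := by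
        intro lc rc hlcrc hrclen hcl hCov
        by_cases hcl2 : lc < l
        · exact le_trans hb'le (Hh lc rc hlcrc hrclen hcl2 hCov)
        · have hrcge : r' ≤ rc := by
            by_contra hlt
            exact hNC1 (covw_mono (by omega) (by omega) hCov)
          have hm1 := hmono r' rc hrcge hrclen
          have hm2 := hmono lc SL.1 (by omega) hl'len
          omega
      have hres := ih (SL.1 + 1) (r' + 1) _ best' hCI3 (by omega) hNC3 Hh3 (by omega)
      exact ⟨le_trans hres.1 hb'le, hres.2⟩

lemma pyGetD_neg_one {xs : List Int} (h : xs ≠ []) :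
    PySem.List.pyGetD xs (-1) 0 = xs.getD (xs.length - 1) 0 := by
  have hlen : 0 < xs.length := List.length_pos_iff.mpr h
  unfold PySem.List.pyGetD PySem.List.pyGet? PySem.List.pyIdx?
  rw [if_neg (by omega), if_pos (by omega)]
  simp [List.getD_eq_getElem?_getD]

lemma foldmin_le_init {β : Type} (xs : List β) (f : β → Int) (init : Int) :
    xs.foldl (fun best i => if f i < best then f i else best) init ≤ init := by
  induction xs generalizing init with
  | nil => simp
  | cons x t iht =>
    simp only [List.foldl_cons]
    refine le_trans (iht _) ?_
    split <;> omega

lemma foldmin_le_mem {β : Type} {xs : List β} {b : β} (hb : b ∈ xs) (f : β → Int) (init : Int) :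
    xs.foldl (fun best i => if f i < best then f i else best) init ≤ f b := by
  induction xs generalizing init with
  | nil => simp at hb
  | cons x t iht =>
    simp only [List.foldl_cons]
    rcases List.mem_cons.mp hb with hbx | hbt
    · subst hbx
      refine le_trans (foldmin_le_init _ _ _) ?_
      split <;> omega
    · exact iht hbt _

lemma foldmin_cases {β : Type} (xs : List β) (f : β → Int) (init : Int) :
    xs.foldl (fun best i => if f i < best then f i else best) init = init ∨
      ∃ b ∈ xs, xs.foldl (fun best i => if f i < best then f i else best) init = f b := by
  induction xs generalizing init with
  | nil => simp
  | cons x t iht =>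
    simp only [List.foldl_cons]
    by_cases hx : f x < init
    · rw [if_pos hx]
      rcases iht (f x) with h | ⟨b, hb, he⟩
      · exact Or.inr ⟨x, List.mem_cons_self, h⟩
      · exact Or.inr ⟨b, List.mem_cons_of_mem _ hb, he⟩
    · rw [if_neg hx]
      rcases iht init with h | ⟨b, hb, he⟩
      · exact Or.inl h
      · exact Or.inr ⟨b, List.mem_cons_of_mem _ hb, he⟩

lemma sorted_getD_mono (nums : List Int) {p q : Nat} (hpq : p ≤ q)
    (hq : q < (PySem.List.sorted nums (fun x => x) false).length) :
    (PySem.List.sorted nums (fun x => x) false).getD p 0 ≤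
      (PySem.List.sorted nums (fun x => x) false).getD q 0 := by
  rw [List.getD_eq_getElem _ _ (by omega), List.getD_eq_getElem _ _ hq]
  exact PySem.List.key_sorted_getElem_mono nums (fun x => x) hpq hq

lemma sorted_getD_mem (nums : List Int) {i : Nat}
    (hi : i < (PySem.List.sorted nums (fun x => x) false).length) :
    (PySem.List.sorted nums (fun x => x) false).getD i 0 ∈ nums := by
  rw [List.getD_eq_getElem _ _ hi]
  exact (PySem.List.sorted_perm nums (fun x => x) false).mem_iff.mp (List.getElem_mem hi)

lemma sorted_getD_head {nums : List Int} {mn : Int}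
    (hmnm : mn ∈ nums) (hmnle : ∀ y ∈ nums, mn ≤ y) :
    (PySem.List.sorted nums (fun x => x) false).getD 0 0 = mn := by
  have hlen : 0 < (PySem.List.sorted nums (fun x => x) false).length := by
    rw [(PySem.List.sorted_perm nums (fun x => x) false).length_eq]
    exact List.length_pos_iff.mpr (List.ne_nil_of_mem hmnm)
  obtain ⟨j, hj, hje⟩ := List.mem_iff_getElem.mp
    ((PySem.List.sorted_perm nums (fun x => x) false).mem_iff.mpr hmnm)
  have h1 : (PySem.List.sorted nums (fun x => x) false).getD 0 0 ≤ mn := by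
    rw [← hje]
    have := sorted_getD_mono nums (Nat.zero_le j) hj
    rw [List.getD_eq_getElem _ _ hj] at this
    exact this
  have h2 : mn ≤ (PySem.List.sorted nums (fun x => x) false).getD 0 0 :=
    hmnle _ (sorted_getD_mem nums hlen)
  omega

lemma sorted_getD_last {nums : List Int} {mx : Int}
    (hmxm : mx ∈ nums) (hmxge : ∀ y ∈ nums, y ≤ mx) :
    (PySem.List.sorted nums (fun x => x) false).getD
      ((PySem.List.sorted nums (fun x => x) false).length - 1) 0 = mx := by
  have hlen : 0 < (PySem.List.sorted nums (fun x => x) false).length := by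
    rw [(PySem.List.sorted_perm nums (fun x => x) false).length_eq]
    exact List.length_pos_iff.mpr (List.ne_nil_of_mem hmxm)
  obtain ⟨j, hj, hje⟩ := List.mem_iff_getElem.mp
    ((PySem.List.sorted_perm nums (fun x => x) false).mem_iff.mpr hmxm)
  have h1 : mx ≤ (PySem.List.sorted nums (fun x => x) false).getD
      ((PySem.List.sorted nums (fun x => x) false).length - 1) 0 := by
    rw [← hje]
    have := sorted_getD_mono nums (p := j)
      (q := (PySem.List.sorted nums (fun x => x) false).length - 1) (by omega) (by omega)
    rw [List.getD_eq_getElem _ _ hj] at this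
    exact this
  have h2 := hmxge _ (sorted_getD_mem nums (i := (PySem.List.sorted nums (fun x => x) false).length - 1) (by omega))
  omega

def pblock (k mn mx : Int) (v : Int) : List (Int × Int) :=
  if v = mn then [(v, v + k)] else if v = mx then [(v, v - k)] else [(v, v - k), (v, v + k)]

lemma mkPairs_eq_flatMap (U : List Int) (k mn mx : Int) :
    mkPairs U k mn mx = U.flatMap (pblock k mn mx) := by
  unfold mkPairs
  have : ∀ (acc : List (Int × Int)),
      U.foldl (fun acc v =>
        if v = mn then acc ++ [(v, v + k)]
        else if v = mx then acc ++ [(v, v - k)]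
        else acc ++ [(v, v - k), (v, v + k)]) acc = acc ++ U.flatMap (pblock k mn mx) := by
    induction U with
    | nil => simp
    | cons x t iht =>
      intro acc
      simp only [List.foldl_cons, List.flatMap_cons]
      by_cases h1 : x = mn
      · subst h1; rw [if_pos rfl, iht]; simp [pblock]
      · by_cases h2 : x = mx
        · subst h2; rw [if_neg h1, if_pos rfl, iht]; simp [pblock, h1]
        · rw [if_neg h1, if_neg h2, iht]; simp [pblock, h1, h2]
  simpa using this []

lemma mem_pblock {k mn mx v : Int} {p : Int × Int} (h : p ∈ pblock k mn mx v) :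
    p.1 = v ∧ (p.2 = v - k ∨ p.2 = v + k) := by
  unfold pblock at h
  split at h
  · simp at h; simp [h]
  · split at h
    · simp at h; simp [h]
    · simp at h
      rcases h with h | h <;> simp [h]

lemma mem_pairs_iff {U : List Int} {k mn mx : Int} {p : Int × Int} :
    p ∈ PySem.List.sorted (mkPairs U k mn mx) (fun t => t.2) false ↔
      ∃ v ∈ U, p ∈ pblock k mn mx v := by
  rw [(PySem.List.sorted_perm (mkPairs U k mn mx) (fun t => t.2) false).mem_iff,
    mkPairs_eq_flatMap, List.mem_flatMap]

lemma pairs_key_mem {U : List Int} {k mn mx : Int} {p : Int × Int}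
    (h : p ∈ PySem.List.sorted (mkPairs U k mn mx) (fun t => t.2) false) : p.1 ∈ U := by
  obtain ⟨v, hv, hp⟩ := mem_pairs_iff.mp h
  have := (mem_pblock hp).1
  rwa [this]

lemma pairs_key_mn {U : List Int} {k mn mx : Int} {p : Int × Int} (hmn : mn ≠ mx)
    (h : p ∈ PySem.List.sorted (mkPairs U k mn mx) (fun t => t.2) false) (hk : p.1 = mn) :
    p.2 = mn + k := by
  obtain ⟨v, hv, hp⟩ := mem_pairs_iff.mp h
  have hv1 := (mem_pblock hp).1
  have hveq : v = mn := by rw [← hv1, hk]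
  subst hveq
  unfold pblock at hp
  rw [if_pos rfl] at hp
  simp at hp
  simp [hp]

lemma pairs_key_mx {U : List Int} {k mn mx : Int} {p : Int × Int} (hmn : mn ≠ mx)
    (h : p ∈ PySem.List.sorted (mkPairs U k mn mx) (fun t => t.2) false) (hk : p.1 = mx) :
    p.2 = mx - k := by
  obtain ⟨v, hv, hp⟩ := mem_pairs_iff.mp h
  have hv1 := (mem_pblock hp).1
  have hveq : v = mx := by rw [← hv1, hk]
  subst hveq
  unfold pblock at hp
  rw [if_neg (fun hc => hmn hc.symm), if_pos rfl] at hp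
  simp at hp
  simp [hp]

lemma pairs_val {U : List Int} {k mn mx : Int} {p : Int × Int}
    (h : p ∈ PySem.List.sorted (mkPairs U k mn mx) (fun t => t.2) false) :
    p.2 = p.1 - k ∨ p.2 = p.1 + k := by
  obtain ⟨v, hv, hp⟩ := mem_pairs_iff.mp h
  obtain ⟨h1, h2⟩ := mem_pblock hp
  rw [h1]
  exact h2

lemma pairs_has_plus {U : List Int} {k mn mx : Int} {v : Int}
    (hv : v ∈ U) (hvmx : v ≠ mx) :
    (v, v + k) ∈ PySem.List.sorted (mkPairs U k mn mx) (fun t => t.2) false := by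
  rw [mem_pairs_iff]
  refine ⟨v, hv, ?_⟩
  unfold pblock
  by_cases h1 : v = mn
  · rw [if_pos h1]; simp
  · rw [if_neg h1, if_neg hvmx]; simp

lemma pairs_has_minus {U : List Int} {k mn mx : Int} {v : Int}
    (hv : v ∈ U) (hvmn : v ≠ mn) :
    (v, v - k) ∈ PySem.List.sorted (mkPairs U k mn mx) (fun t => t.2) false := by
  rw [mem_pairs_iff]
  refine ⟨v, hv, ?_⟩
  unfold pblock
  by_cases h2 : v = mx
  · rw [if_neg hvmn, if_pos h2]; simp
  · rw [if_neg hvmn, if_neg h2]; simp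

lemma pairs_countP_le_two {U : List Int} (hU : U.Nodup) (k mn mx : Int) (v : Int) :
    (PySem.List.sorted (mkPairs U k mn mx) (fun t => t.2) false).countP
      (fun p => decide (p.1 = v)) ≤ 2 := by
  rw [(PySem.List.sorted_perm (mkPairs U k mn mx) (fun t => t.2) false).countP_eq,
    mkPairs_eq_flatMap]
  induction U with
  | nil => simp
  | cons x t iht =>
    rw [List.flatMap_cons, List.countP_append]
    have hx : (pblock k mn mx x).countP (fun p => decide (p.1 = v)) ≤ 2 := by
      unfold pblock
      split
      · simp [List.countP_cons]; split <;> simp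
      · split
        · simp [List.countP_cons]; split <;> simp
        · simp [List.countP_cons]; split <;> simp
    by_cases hxv : x = v
    · subst hxv
      have hxt : x ∉ t := (List.nodup_cons.mp hU).1
      have ht0 : (t.flatMap (pblock k mn mx)).countP (fun p => decide (p.1 = x)) = 0 := by
        rw [List.countP_eq_zero]
        intro p hp
        obtain ⟨w, hw, hpw⟩ := List.mem_flatMap.mp hp
        have := (mem_pblock hpw).1
        simp only [decide_eq_true_eq]
        intro hc
        refine hxt ?_
        have hwx : w = x := by rw [← this, hc]
        rwa [hwx] at hw
      omega
    · have h0 : (pblock k mn mx x).countP (fun p => decide (p.1 = v)) = 0 := by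
        rw [List.countP_eq_zero]
        intro p hp
        have := (mem_pblock hp).1
        simp only [decide_eq_true_eq]
        intro hc
        exact hxv (by rw [← this, hc])
      have := iht (List.nodup_cons.mp hU).2
      omega

def fB (nums : List Int) (k : Int) (i : Int) : Int :=
  max (PySem.List.pyGetD (PySem.List.sorted nums (fun x => x) false) i 0 + k)
      (PySem.List.pyGetD (PySem.List.sorted nums (fun x => x) false) (-1) 0 - k) -
  min (PySem.List.pyGetD (PySem.List.sorted nums (fun x => x) false) 0 0 + k)
      (PySem.List.pyGetD (PySem.List.sorted nums (fun x => x) false) (i + 1) 0 - k)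

lemma pairs_getD_mono (xs : List (Int × Int)) {p q : Nat} (hpq : p ≤ q)
    (hq : q < (PySem.List.sorted xs (fun t => t.2) false).length) :
    ((PySem.List.sorted xs (fun t => t.2) false).getD p (0,0)).2 ≤
      ((PySem.List.sorted xs (fun t => t.2) false).getD q (0,0)).2 := by
  rw [List.getD_eq_getElem _ _ (by omega), List.getD_eq_getElem _ _ hq]
  exact PySem.List.key_sorted_getElem_mono xs (fun t => t.2) hpq hq

lemma getD_mem {α : Type} [Inhabited α] {xs : List α} {j : Nat} (hj : j < xs.length) (d : α) :
    xs.getD j d ∈ xs := by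
  rw [List.getD_eq_getElem _ _ hj]
  exact List.getElem_mem hj

lemma cov_pair {nums : List Int} {k mn mx : Int} {lc rc : Nat}
    (hCov : CovW (PySem.Set.ofList nums)
      (PySem.List.sorted (mkPairs (PySem.Set.ofList nums) k mn mx) (fun t => t.2) false) lc (rc+1))
    {v : Int} (hv : v ∈ nums) :
    ∃ j, lc ≤ j ∧ j ≤ rc ∧
      j < (PySem.List.sorted (mkPairs (PySem.Set.ofList nums) k mn mx) (fun t => t.2) false).length ∧
      ((PySem.List.sorted (mkPairs (PySem.Set.ofList nums) k mn mx) (fun t => t.2) false).getD j (0,0)) ∈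
        (PySem.List.sorted (mkPairs (PySem.Set.ofList nums) k mn mx) (fun t => t.2) false) ∧
      ((PySem.List.sorted (mkPairs (PySem.Set.ofList nums) k mn mx) (fun t => t.2) false).getD j (0,0)).1 = v := by
  have := hCov v ((PySem.Set.mem_ofList nums v).mpr hv)
  obtain ⟨j, hj1, hj2, hj3, hj4⟩ := (wc_pos_iff _ lc (rc+1) v).mp this
  exact ⟨j, hj1, by omega, hj3, getD_mem hj3 _, hj4⟩

lemma alt_ub (nums : List Int) (k mn mx : Int)
    (hmnm : mn ∈ nums) (hmnle : ∀ y ∈ nums, mn ≤ y)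
    (hmxm : mx ∈ nums) (hmxge : ∀ y ∈ nums, y ≤ mx)
    (hmnmx : mn ≠ mx)
    {lc rc : Nat} (hlcrc : lc ≤ rc)
    (hrclen : rc < (PySem.List.sorted (mkPairs (PySem.Set.ofList nums) k mn mx) (fun t => t.2) false).length)
    (hCov : CovW (PySem.Set.ofList nums)
      (PySem.List.sorted (mkPairs (PySem.Set.ofList nums) k mn mx) (fun t => t.2) false) lc (rc+1)) :
    ∃ i : Int, 0 ≤ i ∧ i < ((PySem.List.sorted nums (fun x => x) false).length : Int) - 1 ∧
      fB nums k i ≤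
        ((PySem.List.sorted (mkPairs (PySem.Set.ofList nums) k mn mx) (fun t => t.2) false).getD rc (0,0)).2 -
        ((PySem.List.sorted (mkPairs (PySem.Set.ofList nums) k mn mx) (fun t => t.2) false).getD lc (0,0)).2 := by
  set s := PySem.List.sorted nums (fun x => x) false with hs
  set pairs := PySem.List.sorted (mkPairs (PySem.Set.ofList nums) k mn mx) (fun t => t.2) false with hpairs
  clear_value s
  have harith1 : ∀ a b : Nat, a ≤ b - 2 → 2 ≤ b → ¬(a+1 ≤ b-2) → a+1 = b-1 := by
    intro a b h1 h2 h3; omega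
  have harith2 : ∀ a b : Nat, a ≤ b - 2 → 2 ≤ b → a+1 < b := by
    intro a b h1 h2; omega
  have hslen : s.length = nums.length := by
    rw [hs]; exact (PySem.List.sorted_perm nums (fun x => x) false).length_eq
  have hm : ∀ {p q : Nat}, p ≤ q → q < pairs.length →
      (pairs.getD p (0,0)).2 ≤ (pairs.getD q (0,0)).2 := by
    intro p q hpq hq
    rw [hpairs] at hq ⊢
    exact pairs_getD_mono (mkPairs (PySem.Set.ofList nums) k mn mx) hpq hq
  have hlenfold : (PySem.List.sorted nums (fun x => x) false).length = s.length := by rw [← hs]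
  have hn2 : 2 ≤ s.length := by
    by_contra hlt
    obtain ⟨a, ha, hae⟩ := List.mem_iff_getElem.mp
      ((PySem.List.sorted_perm nums (fun x => x) false).mem_iff.mpr hmnm)
    obtain ⟨b, hb, hbe⟩ := List.mem_iff_getElem.mp
      ((PySem.List.sorted_perm nums (fun x => x) false).mem_iff.mpr hmxm)
    apply hmnmx
    have ha0 : a = 0 := by omega
    have hb0 : b = 0 := by omega
    subst ha0; subst hb0
    rw [← hae, ← hbe]
  have hhead : s.getD 0 0 = mn := by rw [hs]; exact sorted_getD_head hmnm hmnle
  have hlast : s.getD (s.length - 1) 0 = mx := by rw [hs]; exact sorted_getD_last hmxm hmxge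
  have hPdec : DecidablePred (fun m : Nat => s.getD m 0 = mn ∨ (s.getD m 0 ≠ mx ∧
      ∃ j, lc ≤ j ∧ j ≤ rc ∧ pairs.getD j (0,0) = (s.getD m 0, s.getD m 0 + k))) :=
    fun _ => Classical.dec _
  set P : Nat → Prop := fun m => s.getD m 0 = mn ∨ (s.getD m 0 ≠ mx ∧
      ∃ j, lc ≤ j ∧ j ≤ rc ∧ pairs.getD j (0,0) = (s.getD m 0, s.getD m 0 + k)) with hP
  have hP0 : P 0 := Or.inl hhead
  set I := @Nat.findGreatest P hPdec (s.length - 2) with hI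
  have hIle : I ≤ s.length - 2 := Nat.findGreatest_le _
  have hPI : P I := Nat.findGreatest_spec (Nat.zero_le _) hP0
  have hImax : ∀ m, m ≤ s.length - 2 → P m → m ≤ I := fun m hm hPm => Nat.le_findGreatest hm hPm
  clear_value I
  have hPnotI1 : ¬ P (I + 1) := by
    intro hPs
    by_cases hc : I + 1 ≤ s.length - 2
    · have := hImax (I+1) hc hPs; omega
    · have he : I + 1 = s.length - 1 := harith1 I s.length hIle hn2 hc
      rw [hP] at hPs
      rcases hPs with h | ⟨h, _⟩
      · rw [he, hlast] at h; exact hmnmx h.symm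
      · rw [he, hlast] at h; exact h rfl
  have hI1lt : I + 1 < s.length := harith2 I s.length hIle hn2
  have hv1mem : s.getD (I+1) 0 ∈ nums := by
    rw [hs]; exact sorted_getD_mem nums (by rw [← hs]; exact hI1lt)
  have hv1mn : s.getD (I+1) 0 ≠ mn := by
    intro hc; exact hPnotI1 (Or.inl hc)
  -- window pair for s[I+1] has shifted value s[I+1] - k
  obtain ⟨j1, hj1l, hj1r, hj1len, hj1mem, hj1key⟩ := cov_pair hCov hv1mem
  have hval1 : (pairs.getD j1 (0,0)).2 = s.getD (I+1) 0 - k := by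
    rcases pairs_val hj1mem with h | h
    · rw [h, hj1key]
    · by_cases hmxc : s.getD (I+1) 0 = mx
      · rw [pairs_key_mx hmnmx hj1mem (by rw [hj1key, hmxc]), ← hmxc]
      · exfalso
        refine hPnotI1 (Or.inr ⟨hmxc, j1, hj1l, hj1r, ?_⟩)
        have : pairs.getD j1 (0,0) = ((pairs.getD j1 (0,0)).1, (pairs.getD j1 (0,0)).2) := rfl
        rw [this, hj1key, h, hj1key]
  have hLOW2 : (pairs.getD lc (0,0)).2 ≤ s.getD (I+1) 0 - k := by
    rw [← hval1]
    exact hm hj1l hj1len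
  -- mn window pair
  obtain ⟨jm, hjml, hjmr, hjmlen, hjmmem, hjmkey⟩ := cov_pair hCov hmnm
  have hvalm : (pairs.getD jm (0,0)).2 = mn + k := pairs_key_mn hmnmx hjmmem hjmkey
  have hLOW1 : (pairs.getD lc (0,0)).2 ≤ mn + k := by
    rw [← hvalm]
    exact hm hjml hjmlen
  have hHIGH1a : mn + k ≤ (pairs.getD rc (0,0)).2 := by
    rw [← hvalm]
    exact hm hjmr hrclen
  -- mx window pair
  obtain ⟨jx, hjxl, hjxr, hjxlen, hjxmem, hjxkey⟩ := cov_pair hCov hmxm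
  have hvalx : (pairs.getD jx (0,0)).2 = mx - k := pairs_key_mx hmnmx hjxmem hjxkey
  have hHIGH2 : mx - k ≤ (pairs.getD rc (0,0)).2 := by
    rw [← hvalx]
    exact hm hjxr hrclen
  have hHIGH1 : s.getD I 0 + k ≤ (pairs.getD rc (0,0)).2 := by
    rw [hP] at hPI
    rcases hPI with h | ⟨_, j2, hj2l, hj2r, hj2e⟩
    · rw [h]; exact hHIGH1a
    · have hv : (pairs.getD j2 (0,0)).2 = s.getD I 0 + k := by rw [hj2e]
      rw [← hv]
      have := pairs_getD_mono (mkPairs (PySem.Set.ofList nums) k mn mx) hj2r (by rw [← hpairs]; omega)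
      rw [← hpairs] at this
      exact this
  refine ⟨(I : Int), Int.natCast_nonneg I, by omega, ?_⟩
  have hfB : fB nums k (I : Int) =
      max (s.getD I 0 + k) (s.getD (s.length - 1) 0 - k) -
      min (s.getD 0 0 + k) (s.getD (I+1) 0 - k) := by
    rw [fB]
    rw [PySem.List.pyGetD_of_nonneg _ _ (by positivity)]
    rw [PySem.List.pyGetD_of_nonneg _ _ (by positivity : (0:Int) ≤ (I:Int) + 1)]
    rw [PySem.List.pyGetD_of_nonneg _ _ (le_refl 0)]
    rw [pyGetD_neg_one (by rw [← List.length_pos_iff]; omega)]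
    rw [← hs]
    have h1 : ((I : Int)).toNat = I := Int.toNat_natCast I
    have h2 : ((I : Int) + 1).toNat = I + 1 := by omega
    have h3 : ((0 : Int)).toNat = 0 := rfl
    rw [h1, h2, h3]
  rw [hfB, hhead, hlast]
  have hm1 := max_le hHIGH1 hHIGH2
  have hm2 := le_min hLOW1 hLOW2
  omega

lemma alt_lb (nums : List Int) (k mn mx : Int)
    (hmnm : mn ∈ nums) (hmnle : ∀ y ∈ nums, mn ≤ y)
    (hmxm : mx ∈ nums) (hmxge : ∀ y ∈ nums, y ≤ mx)
    (hmnmx : mn ≠ mx)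
    {i : Int} (hi0 : 0 ≤ i)
    (hin : i < ((PySem.List.sorted nums (fun x => x) false).length : Int) - 1) :
    ∃ lc rc : Nat, lc ≤ rc ∧
      rc < (PySem.List.sorted (mkPairs (PySem.Set.ofList nums) k mn mx) (fun t => t.2) false).length ∧
      CovW (PySem.Set.ofList nums)
        (PySem.List.sorted (mkPairs (PySem.Set.ofList nums) k mn mx) (fun t => t.2) false) lc (rc+1) ∧
      ((PySem.List.sorted (mkPairs (PySem.Set.ofList nums) k mn mx) (fun t => t.2) false).getD rc (0,0)).2 -
        ((PySem.List.sorted (mkPairs (PySem.Set.ofList nums) k mn mx) (fun t => t.2) false).getD lc (0,0)).2 ≤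
        fB nums k i := by
  set s := PySem.List.sorted nums (fun x => x) false with hs
  set pairs := PySem.List.sorted (mkPairs (PySem.Set.ofList nums) k mn mx) (fun t => t.2) false with hpairs
  have hm : ∀ {p q : Nat}, p ≤ q → q < pairs.length →
      (pairs.getD p (0,0)).2 ≤ (pairs.getD q (0,0)).2 := by
    intro p q hpq hq
    rw [hpairs] at hq ⊢
    exact pairs_getD_mono (mkPairs (PySem.Set.ofList nums) k mn mx) hpq hq
  have hhead : s.getD 0 0 = mn := sorted_getD_head hmnm hmnle
  have hlast : s.getD (s.length - 1) 0 = mx := sorted_getD_last hmxm hmxge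
  set iN := i.toNat with hiN
  have hiNlt : iN + 1 < s.length := by omega
  have hsmemD : ∀ {j : Nat}, j < s.length → s.getD j 0 ∈ nums := fun hj => sorted_getD_mem nums hj
  have hsmono : ∀ {p q : Nat}, p ≤ q → q < s.length → s.getD p 0 ≤ s.getD q 0 :=
    fun hpq hq => sorted_getD_mono nums hpq hq
  set lo := min (mn + k) (s.getD (iN+1) 0 - k) with hlo
  set hi := max (s.getD iN 0 + k) (mx - k) with hhi
  set T := (Finset.range pairs.length).filter
    (fun j => lo ≤ (pairs.getD j (0,0)).2 ∧ (pairs.getD j (0,0)).2 ≤ hi) with hT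
  have hmem_T : ∀ {q : Int × Int}, q ∈ pairs → lo ≤ q.2 → q.2 ≤ hi →
      ∃ j ∈ T, (pairs.getD j (0,0)) = q := by
    intro q hq hql hqh
    obtain ⟨j, hj, hje⟩ := List.mem_iff_getElem.mp hq
    have hgd : pairs.getD j (0,0) = q := by rw [List.getD_eq_getElem _ _ hj, hje]
    refine ⟨j, ?_, hgd⟩
    rw [hT, Finset.mem_filter, Finset.mem_range]
    exact ⟨hj, by rw [hgd]; exact hql, by rw [hgd]; exact hqh⟩
  -- mn's pair is in T
  have hmnU : mn ∈ PySem.Set.ofList nums := (PySem.Set.mem_ofList nums mn).mpr hmnm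
  have hmxU : mx ∈ PySem.Set.ofList nums := (PySem.Set.mem_ofList nums mx).mpr hmxm
  have hmnk_hi : mn + k ≤ hi := by
    have h1 : mn ≤ s.getD iN 0 := hmnle _ (hsmemD (by omega))
    have := le_max_left (s.getD iN 0 + k) (mx - k)
    rw [← hhi] at this
    omega
  have hmxk_lo : lo ≤ mx - k := by
    have h1 : s.getD (iN+1) 0 ≤ mx := hmxge _ (hsmemD hiNlt)
    have := min_le_right (mn + k) (s.getD (iN+1) 0 - k)
    rw [← hlo] at this
    omega
  obtain ⟨j0, hj0T, hj0e⟩ := hmem_T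
    (by rw [hpairs]; exact pairs_has_plus hmnU hmnmx)
    (by simp [hlo]) hmnk_hi
  have hTne : T.Nonempty := ⟨j0, hj0T⟩
  refine ⟨T.min' hTne, T.max' hTne, T.min'_le (T.max' hTne) (T.max'_mem hTne), ?_, ?_, ?_⟩
  · have := (Finset.mem_filter.mp (T.max'_mem hTne)).1
    rw [Finset.mem_range] at this
    exact this
  · -- coverage
    intro v hvU
    have hvnum : v ∈ nums := (PySem.Set.mem_ofList nums v).mp hvU
    obtain ⟨jv, hjv, hjve⟩ := List.mem_iff_getElem.mp
      ((PySem.List.sorted_perm nums (fun x => x) false).mem_iff.mpr hvnum)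
    have hjv' : jv < s.length := hjv
    have hjvD : s.getD jv 0 = v := by
      rw [hs]
      rw [List.getD_eq_getElem _ _ hjv, hjve]
    have hget : ∃ q : Int × Int, q ∈ pairs ∧ q.1 = v ∧ lo ≤ q.2 ∧ q.2 ≤ hi := by
      by_cases hcase : jv ≤ iN
      · by_cases hvmx : v = mx
        · refine ⟨(mx, mx - k), by rw [hpairs]; exact pairs_has_minus hmxU (Ne.symm hmnmx), by rw [hvmx], hmxk_lo, ?_⟩
          simp [hhi]
        · refine ⟨(v, v + k), by rw [hpairs]; exact pairs_has_plus hvU hvmx, rfl, ?_, ?_⟩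
          · have h1 : mn ≤ v := hmnle _ hvnum
            have := min_le_left (mn + k) (s.getD (iN+1) 0 - k)
            rw [← hlo] at this
            omega
          · have h1 : v ≤ s.getD iN 0 := by
              rw [← hjvD]
              exact hsmono hcase (by omega)
            have := le_max_left (s.getD iN 0 + k) (mx - k)
            rw [← hhi] at this
            omega
      · by_cases hvmn : v = mn
        · refine ⟨(mn, mn + k), by rw [hpairs]; exact pairs_has_plus hmnU hmnmx, by rw [hvmn], by simp [hlo], hmnk_hi⟩
        · refine ⟨(v, v - k), by rw [hpairs]; exact pairs_has_minus hvU hvmn, rfl, ?_, ?_⟩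
          · have h1 : s.getD (iN+1) 0 ≤ v := by
              rw [← hjvD]
              exact hsmono (by omega) hjv'
            have := min_le_right (mn + k) (s.getD (iN+1) 0 - k)
            rw [← hlo] at this
            omega
          · have h1 : v ≤ mx := hmxge _ hvnum
            have := le_max_right (s.getD iN 0 + k) (mx - k)
            rw [← hhi] at this
            omega
    obtain ⟨q, hqmem, hqkey, hql, hqh⟩ := hget
    obtain ⟨j, hjT, hje⟩ := hmem_T hqmem hql hqh
    have hjrange := (Finset.mem_filter.mp hjT).1
    rw [Finset.mem_range] at hjrange
    refine (wc_pos_iff _ _ _ _).mpr ⟨j, T.min'_le _ hjT, ?_, ?_, ?_⟩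
    · have := T.le_max' _ hjT
      omega
    · exact hjrange
    · rw [hje, hqkey]
  · -- range bound
    have hlcT := T.min'_mem hTne
    have hrcT := T.max'_mem hTne
    have hlc_lo : lo ≤ (pairs.getD (T.min' hTne) (0,0)).2 := (Finset.mem_filter.mp hlcT).2.1
    have hrc_hi : (pairs.getD (T.max' hTne) (0,0)).2 ≤ hi := (Finset.mem_filter.mp hrcT).2.2
    have hfB : fB nums k i = hi - lo := by
      rw [fB]
      rw [PySem.List.pyGetD_of_nonneg _ _ hi0]
      rw [PySem.List.pyGetD_of_nonneg _ _ (by omega : (0:Int) ≤ i + 1)]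
      rw [PySem.List.pyGetD_of_nonneg _ _ (le_refl 0)]
      rw [pyGetD_neg_one (by rw [← List.length_pos_iff, ← hs]; omega)]
      rw [← hs]
      have h2 : (i + 1).toNat = iN + 1 := by omega
      have h3 : ((0 : Int)).toNat = 0 := rfl
      rw [h2, h3, ← hiN, hhead, hlast, hhi, hlo]
    rw [hfB]
    omega

lemma foldl_add_const {t : List Int} {c : Int} (h : ∀ y ∈ t, y = c) {acc : List Int}
    (hc : c ∈ acc) : t.foldl PySem.Set.add acc = acc := by
  induction t generalizing acc with
  | nil => rfl
  | cons x t iht =>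
    have hx : x = c := h x List.mem_cons_self
    rw [List.foldl_cons]
    have hadd : PySem.Set.add acc x = acc := by
      unfold PySem.Set.add
      rw [if_pos (by simp [hx]; exact hc)]
    rw [hadd]
    exact iht (fun y hy => h y (List.mem_cons_of_mem _ hy)) hc

lemma ofList_const {nums : List Int} {c : Int} (h : ∀ y ∈ nums, y = c) (hne : nums ≠ []) :
    PySem.Set.ofList nums = [c] := by
  cases nums with
  | nil => exact absurd rfl hne
  | cons x t =>
    have hx : x = c := h x List.mem_cons_self
    subst hx
    have : PySem.Set.ofList (x :: t) = t.foldl PySem.Set.add [x] := by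
      rfl
    rw [this]
    exact foldl_add_const (fun y hy => h y (List.mem_cons_of_mem _ hy)) List.mem_cons_self

lemma sorted_singleton (p : Int × Int) :
    PySem.List.sorted [p] (fun t => t.2) false = [p] := rfl

lemma pairs_degenerate {nums : List Int} {k mn : Int}
    (h : ∀ y ∈ nums, y = mn) (hne : nums ≠ []) :
    PySem.List.sorted (mkPairs (PySem.Set.ofList nums) k mn mn) (fun t => t.2) false
      = [(mn, mn + k)] := by
  rw [ofList_const h hne]
  have : mkPairs [mn] k mn mn = [(mn, mn + k)] := by
    unfold mkPairs
    simp
  rw [this, sorted_singleton]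

lemma fB_nonneg (nums : List Int) (k mn : Int)
    (hmnm : mn ∈ nums) (hmnle : ∀ y ∈ nums, mn ≤ y)
    {i : Int} (hi0 : 0 ≤ i)
    (hin : i < ((PySem.List.sorted nums (fun x => x) false).length : Int) - 1) :
    0 ≤ fB nums k i := by
  set s := PySem.List.sorted nums (fun x => x) false with hs
  have hhead : s.getD 0 0 = mn := sorted_getD_head hmnm hmnle
  have hiNlt : i.toNat < s.length := by omega
  have hge : mn ≤ s.getD i.toNat 0 := hmnle _ (sorted_getD_mem nums hiNlt)
  rw [fB]
  rw [PySem.List.pyGetD_of_nonneg _ _ hi0, PySem.List.pyGetD_of_nonneg _ _ (le_refl 0)]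
  rw [← hs]
  have h3 : ((0 : Int)).toNat = 0 := rfl
  rw [h3, hhead]
  have h1 : min (mn + k) (PySem.List.pyGetD s (i + 1) 0 - k) ≤ mn + k := min_le_left _ _
  have h2 : s.getD i.toNat 0 + k ≤ max (s.getD i.toNat 0 + k) (PySem.List.pyGetD s (-1) 0 - k) :=
    le_max_left _ _
  omega

theorem final_eq (nums : List Int) (k : Int) (hne : nums ≠ []) :
    smallest_range_2 nums k = smallest_range_2_alt nums k := by
  cases hmin : PySem.List.min? nums (fun x => x) with
  | none => exact absurd ((PySem.List.min?_eq_none_iff _ _).mp hmin) hne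
  | some mn =>
  cases hmax : PySem.List.max? nums (fun x => x) with
  | none => exact absurd ((PySem.List.max?_eq_none_iff _ _).mp hmax) hne
  | some mx =>
  have hmnm := PySem.List.min?_mem hmin
  have hmnle : ∀ y ∈ nums, mn ≤ y := PySem.List.min?_isMin hmin
  have hmxm := PySem.List.max?_mem hmax
  have hmxge : ∀ y ∈ nums, y ≤ mx := PySem.List.max?_isMax hmax
  by_cases hk : k ≥ mx - mn
  · simp only [smallest_range_2, smallest_range_2_alt, hmin, hmax, ge_iff_le, if_pos hk]
  · have hA : smallest_range_2 nums k =
        mainLoop (PySem.List.sorted (mkPairs (PySem.Set.ofList nums) k mn mx) (fun t => t.2) false)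
          (PySem.Set.ofList nums).length
          ((PySem.List.sorted (mkPairs (PySem.Set.ofList nums) k mn mx) (fun t => t.2) false).length + 2)
          0 0 (PySem.Dict.mk []) (mx - mn) := by
      simp only [smallest_range_2, hmin, hmax, ge_iff_le, if_neg hk]
    have hB : smallest_range_2_alt nums k =
        (PySem.List.pyRange 0 (((PySem.List.sorted nums (fun x => x) false).length : Int) - 1) 1).foldl
          (fun best i => if fB nums k i < best then fB nums k i else best) (mx - mn) := by
      simp only [smallest_range_2_alt, hmin, hmax, ge_iff_le, if_neg hk]
      rfl
    rw [hA, hB]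
    set U := PySem.Set.ofList nums with hU
    set pairsT := PySem.List.sorted (mkPairs U k mn mx) (fun t => t.2) false with hpairsT
    set sT := PySem.List.sorted nums (fun x => x) false with hsT
    set r0 := mx - mn with hr0
    set altF := (PySem.List.pyRange 0 ((sT.length : Int) - 1) 1).foldl
      (fun best i => if fB nums k i < best then fB nums k i else best) r0 with haltF
    have hUnodup : U.Nodup := PySem.Set.nodup_ofList nums
    have hkeys : ∀ p ∈ pairsT, p.1 ∈ U := fun p hp => pairs_key_mem hp
    have htwo : ∀ v, pairsT.countP (fun p => decide (p.1 = v)) ≤ 2 :=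
      fun v => pairs_countP_le_two hUnodup k mn mx v
    have hmnU : mn ∈ U := (PySem.Set.mem_ofList nums mn).mpr hmnm
    have hUne : U ≠ [] := List.ne_nil_of_mem hmnU
    have hmono : ∀ p q : Nat, p ≤ q → q < pairsT.length →
        (pairsT.getD p (0,0)).2 ≤ (pairsT.getD q (0,0)).2 :=
      fun p q hpq hq => pairs_getD_mono _ hpq hq
    have hCI0 : CI pairsT 0 0 (PySem.Dict.mk []) := by
      refine ⟨by simp [PySem.Dict.items], ?_, ?_⟩
      · intro v; simp [PySem.Dict.items, wc]
      · intro p hp; simp [PySem.Dict.items] at hp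
    have hNC0 : ¬ CovW U pairsT 0 0 := by
      intro hc
      have := hc mn hmnU
      simp [wc] at this
    have hupper := main_upper U pairsT hUnodup hkeys htwo hUne hmono
      (pairsT.length + 2) 0 0 (PySem.Dict.mk []) r0 hCI0 (le_refl 0) hNC0
      (fun lc rc _ _ hlt => absurd hlt (Nat.not_lt_zero lc)) (by omega)
    have halt : ∀ lc rc : Nat, lc ≤ rc → rc < pairsT.length → CovW U pairsT lc (rc+1) →
        altF ≤ (pairsT.getD rc (0,0)).2 - (pairsT.getD lc (0,0)).2 := by
      by_cases hmm : mn = mx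
      · subst hmm
        intro lc rc h1 h2 hcov
        have hall : ∀ y ∈ nums, y = mn := fun y hy => le_antisymm (hmxge y hy) (hmnle y hy)
        have hdeg : pairsT = [(mn, mn + k)] := by
          rw [hpairsT, hU]
          exact pairs_degenerate hall hne
        rw [hdeg] at h2
        simp only [List.length_cons, List.length_nil] at h2
        have hlc0 : lc = 0 := by omega
        have hrc0 : rc = 0 := by omega
        subst hlc0; subst hrc0
        have hinit := foldmin_le_init (PySem.List.pyRange 0 ((sT.length : Int) - 1) 1) (fB nums k) r0
        rw [← haltF] at hinit
        omega
      · intro lc rc h1 h2 hcov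
        obtain ⟨i, hi0, hin, hfb⟩ := alt_ub nums k mn mx hmnm hmnle hmxm hmxge hmm h1 h2 hcov
        have hin' : i < ((sT.length : Int) - 1) := hin
        have hle := foldmin_le_mem (PySem.List.mem_pyRange_one.mpr ⟨hi0, hin'⟩) (fB nums k) r0
        rw [← haltF] at hle
        exact le_trans hle hfb
    have hlower := main_lower U pairsT altF hUnodup hkeys htwo hUne halt
      (pairsT.length + 2) 0 0 (PySem.Dict.mk []) r0 hCI0 (le_refl 0) hNC0
      (by
        have := foldmin_le_init (PySem.List.pyRange 0 ((sT.length : Int) - 1) 1) (fB nums k) r0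
        rw [← haltF] at this
        exact this)
    refine le_antisymm ?_ hlower
    rcases foldmin_cases (PySem.List.pyRange 0 ((sT.length : Int) - 1) 1) (fB nums k) r0 with hc | ⟨i, himem, he⟩
    · rw [← haltF] at hc
      rw [hc]
      exact hupper.1
    · rw [← haltF] at he
      rw [he]
      obtain ⟨hi0, hin⟩ := PySem.List.mem_pyRange_one.mp himem
      by_cases hmm : mn = mx
      · subst hmm
        have hall : ∀ y ∈ nums, y = mn := fun y hy => le_antisymm (hmxge y hy) (hmnle y hy)
        have hdeg : pairsT = [(mn, mn + k)] := by
          rw [hpairsT, hU]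
          exact pairs_degenerate hall hne
        have hcov01 : CovW U pairsT 0 1 := by
          intro v hv
          have hvmn : v = mn := by
            rw [hU, ofList_const hall hne] at hv
            simpa using hv
          subst hvmn
          rw [hdeg]
          simp [wc]
        have hwin := hupper.2 0 0 (le_refl 0) (by rw [hdeg]; simp) hcov01
        have hrange0 : (pairsT.getD 0 (0,0)).2 - (pairsT.getD 0 (0,0)).2 = 0 := by omega
        have hfb0 : 0 ≤ fB nums k i := fB_nonneg nums k mn hmnm hmnle hi0 hin
        omega
      · obtain ⟨lc, rc, h1, h2, hcov, hrange⟩ := alt_lb nums k mn mx hmnm hmnle hmxm hmxge hmm hi0 hin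
        have hwin := hupper.2 lc rc h1 h2 hcov
        exact le_trans hwin hrange

-- ===== VERDICT (by name: the statement is the Claim_ definition above) =====
theorem smallest_range_2_spec : Claim_equal_smallest_range_2 := by
  intro nums k _ hne
  unfold Spec_smallest_range_2
  exact final_eq nums k hne
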